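-- pv_equiv track=rewrite | github.com/kossaych/Bac_ex_approx | app/views.py | Facteur
-- ===== SOURCE A (Python) =====
-- def estpremier(x) :
--     i = 2
--     test = True
--     while(test == True and i<= x//2) :
--         if x%2 == 0 :
--             test = False
--         i = i + 1
--     return test
--
-- def premier_suivant(n):
--     n += 1
--     while not estpremier(n):
--         n += 1
--     return n
--
-- def Facteur(M) :
--     ch = ""
--     while M > 1:
--         i = 2
--         while M % i != 0:
--             i = premier_suivant(i)
--         ch = ch  + str(i)
--         M = M // i
--     max = int(ch[0])
--     for i in range (0,len(ch)) :
--         if int(ch[i]) > max :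
--             max = int(ch[i])
--     return max
-- ===== SOURCE B (Python) =====
-- def _maxdigit(n):
--     m = 0
--     while n > 0:
--         d = n % 10
--         if d > m:
--             m = d
--         n //= 10
--     return m
--
-- def Facteur(M):
--     best = 0
--     d = 2
--     while d * d <= M:
--         while M % d == 0:
--             md = _maxdigit(d)
--             if md > best:
--                 best = md
--             M //= d
--         d = d + 1 if d == 2 else d + 2
--     if M > 1:
--         md = _maxdigit(M)
--         if md > best:
--             best = md
--     return best
-- ===== Notes on version B (the rewrite author's own statement) =====
-- stated objective: faster
-- what changed: B replaces A's quadratic smallest-factor search (which probes each candidate with an O(x) 'primality' scan and then re-reads the concatenated digit string) by trial division with candidates only up to sqrt(M), computing the running maximum digit arithmetically (%10, //10) with no string at all.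
-- outside the precondition, e.g. on Facteur(1): A raises IndexError, B returns 0
import Mathlib
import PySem

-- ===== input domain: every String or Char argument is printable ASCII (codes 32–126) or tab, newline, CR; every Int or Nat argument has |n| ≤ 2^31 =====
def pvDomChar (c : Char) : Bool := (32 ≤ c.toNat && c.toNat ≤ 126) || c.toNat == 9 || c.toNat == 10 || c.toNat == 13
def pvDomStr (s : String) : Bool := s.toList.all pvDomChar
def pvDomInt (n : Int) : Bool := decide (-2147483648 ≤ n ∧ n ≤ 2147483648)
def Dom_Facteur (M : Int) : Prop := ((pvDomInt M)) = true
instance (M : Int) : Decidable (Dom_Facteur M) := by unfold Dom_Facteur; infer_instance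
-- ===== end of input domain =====

-- B replaces A's quadratic smallest-factor search and digit string by trial division up to sqrt(M)
-- with an arithmetic running-maximum digit; measured faster (asymptotic).

-- ===== PORT A =====
-- while(test == True and i <= x//2): if x%2 == 0: test = False; i += 1
-- fuel (x//2).toNat is exact: the loop runs at most max(0, x//2 - 1) iterations, and once
-- test is False the remaining fuel is irrelevant (the recursion returns test).
def faEstLoop (x : Int) : Int → Bool → Nat → Bool
  | _, test, 0 => test
  | i, test, f+1 =>
    if test = true ∧ i ≤ PySem.Int.floordiv x 2 then
      faEstLoop x (i+1) (if PySem.Int.mod x 2 = 0 then false else test) f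
    else test

def estpremier (x : Int) : Bool := faEstLoop x 2 true (PySem.Int.floordiv x 2).toNat

-- n += 1; while not estpremier(n): n += 1  — fuel 2 is exact: estpremier is False only on
-- even numbers ≥ 4, so of n+1, n+2 at least one satisfies it.
def psLoop : Int → Nat → Int
  | n, 0 => n
  | n, f+1 => if ¬ estpremier n then psLoop (n+1) f else n

def premier_suivant (n : Int) : Int := psLoop (n+1) 2

-- while M % i != 0: i = premier_suivant(i)
def faInner (M : Int) : Int → Nat → Int
  | i, 0 => i
  | i, f+1 => if PySem.Int.mod M i ≠ 0 then faInner M (premier_suivant i) f else i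

-- while M > 1: i = …; ch = ch + str(i); M = M // i   (ch kept as List Char)
def faOuter : Int → List Char → Nat → List Char
  | _, ch, 0 => ch
  | M, ch, f+1 =>
    if M > 1 then
      let i := faInner M 2 (M.toNat + 2)
      faOuter (PySem.Int.floordiv M i) (ch ++ PySem.Int.toChars i) f
    else ch

-- port of int(ch[i]): exact for the decimal-digit characters ch consists of
def digitVal (c : Char) : Int := (c.toNat : Int) - 48

def Facteur (M : Int) : Int :=
  let ch := faOuter M [] M.toNat
  match ch with
  | [] => 0  -- unreachable under Pre_Facteur: Python raises IndexError reading ch[0]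
  | c :: _ =>
    -- max = int(ch[0]); for i in range(0, len(ch)): if int(ch[i]) > max: max = int(ch[i])
    ch.foldl (fun mx c' => if digitVal c' > mx then digitVal c' else mx) (digitVal c)

-- ===== PORT B =====
-- while n > 0: d = n % 10; if d > m: m = d; n //= 10
def bMDLoop : Int → Int → Nat → Int
  | _, m, 0 => m
  | n, m, f+1 =>
    if n > 0 then
      bMDLoop (PySem.Int.floordiv n 10) (if PySem.Int.mod n 10 > m then PySem.Int.mod n 10 else m) f
    else m

def bMaxdigit (n : Int) : Int := bMDLoop n 0 n.toNat

-- while M % d == 0: md = _maxdigit(d); if md > best: best = md; M //= d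
def bInner (d : Int) : Int → Int → Nat → Int × Int
  | M, best, 0 => (M, best)
  | M, best, f+1 =>
    if PySem.Int.mod M d = 0 then
      let md := bMaxdigit d
      bInner d (PySem.Int.floordiv M d) (if md > best then md else best) f
    else (M, best)

-- while d * d <= M: … ; d = d + 1 if d == 2 else d + 2
def bOuter : Int → Int → Int → Nat → Int × Int
  | M, _, best, 0 => (M, best)
  | M, d, best, f+1 =>
    if d * d ≤ M then
      let r := bInner d M best M.toNat
      bOuter r.1 (if d = 2 then d + 1 else d + 2) r.2 f
    else (M, best)

def Facteur_alt (M : Int) : Int :=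
  let r := bOuter M 2 0 M.toNat
  if r.1 > 1 then
    let md := bMaxdigit r.1
    if md > r.2 then md else r.2
  else r.2

-- ===== PRECONDITION & SPEC =====
-- A raises IndexError for M ≤ 1 (the factor string stays empty and A reads ch[0]).
def Pre_Facteur (M : Int) : Prop := 2 ≤ M
instance (M : Int) : Decidable (Pre_Facteur M) := by unfold Pre_Facteur; infer_instance
def pvWitness_Facteur : Int := 12

def Spec_Facteur (M : Int) (out : Int) : Prop := out = Facteur_alt M
instance (M : Int) (out : Int) : Decidable (Spec_Facteur M out) := by unfold Spec_Facteur; infer_instance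

-- ===== CLAIM (what is proved, stated in full; the proofs are below) =====
def Claim_equal_Facteur : Prop := ∀ (M : Int), Dom_Facteur M → Pre_Facteur M → Spec_Facteur M (Facteur M)

-- ===== LEMMAS AND PROOFS =====

-- maximum decimal digit of n, low-to-high
def MD (n : Nat) : Int := if n = 0 then 0 else max ((n % 10 : Nat) : Int) (MD (n / 10))
decreasing_by exact Nat.div_lt_self (Nat.pos_of_ne_zero (by assumption)) (by norm_num)

-- maximum digit over the prime factorization (the common reference value)
def G (m : Nat) : Int := if h : 2 ≤ m then max (MD m.minFac) (G (m / m.minFac)) else 0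
decreasing_by
  exact Nat.div_lt_self (by omega) ((Nat.minFac_prime (by omega)).two_le)

-- decimal digits of n, high-to-low (normal form of Nat.toDigits 10)
def myDigs (n : Nat) : List Char :=
  if h : n / 10 = 0 then [(n % 10).digitChar] else myDigs (n / 10) ++ [(n % 10).digitChar]
decreasing_by exact Nat.div_lt_self (by omega) (by norm_num)

-- the concatenated factor string A builds
def chFacs (m : Nat) : List Char :=
  if h : 2 ≤ m then PySem.Int.toChars m.minFac ++ chFacs (m / m.minFac) else []
decreasing_by
  exact Nat.div_lt_self (by omega) ((Nat.minFac_prime (by omega)).two_le)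

-- m with all factors p divided out
def strip (m p : Nat) : Nat := if h : 2 ≤ p ∧ p ∣ m ∧ 1 ≤ m then strip (m / p) p else m
decreasing_by exact Nat.div_lt_self (by omega) (by omega)

def dsup (l : List Char) : Int := l.foldl (fun mx c => max mx (digitVal c)) 0

theorem MD_nonneg (n : Nat) : 0 ≤ MD n := by
  induction n using Nat.strong_induction_on with
  | _ n ih =>
    rw [MD]; split
    · omega
    · have := ih (n / 10) (Nat.div_lt_self (by omega) (by norm_num))
      omega

theorem G_nonneg (m : Nat) : 0 ≤ G m := by
  induction m using Nat.strong_induction_on with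
  | _ m ih =>
    rw [G]; split
    · have h2 : 2 ≤ m := by assumption
      have := ih (m / m.minFac)
        (Nat.div_lt_self (by omega) ((Nat.minFac_prime (by omega)).two_le))
      have := MD_nonneg m.minFac
      omega
    · omega

theorem faEstLoop_odd (x : Int) (h : PySem.Int.mod x 2 ≠ 0) :
    ∀ (f : Nat) (i : Int), faEstLoop x i true f = true := by
  intro f
  induction f with
  | zero => intro i; rfl
  | succ f ih =>
    intro i
    rw [faEstLoop]
    split
    · exact ih (i+1)
    · rfl

theorem faEstLoop_false (x : Int) : ∀ (f : Nat) (i : Int), faEstLoop x i false f = false := by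
  intro f
  induction f with
  | zero => intro i; rfl
  | succ f ih =>
    intro i
    rw [faEstLoop]
    split
    · rename_i hc; simp at hc
    · rfl

theorem estpremier_odd (x : Int) (h : PySem.Int.mod x 2 = 1) : estpremier x = true := by
  exact faEstLoop_odd x (by omega) _ 2

theorem estpremier_even (x : Int) (h : PySem.Int.mod x 2 = 0) (h4 : 4 ≤ x) :
    estpremier x = false := by
  have hd : PySem.Int.floordiv x 2 = x / 2 := PySem.Int.floordiv_eq_ediv_of_pos (by norm_num)
  have h2 : 2 ≤ PySem.Int.floordiv x 2 := by rw [hd]; omega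
  obtain ⟨f, hf⟩ := Nat.exists_eq_succ_of_ne_zero
    (n := (PySem.Int.floordiv x 2).toNat) (by omega)
  unfold estpremier
  rw [hf, faEstLoop, if_pos ⟨rfl, h2⟩, if_pos h]
  exact faEstLoop_false x f 3

theorem ps_odd (c : Int) (h : PySem.Int.mod c 2 = 1) (h3 : 3 ≤ c) :
    premier_suivant c = c + 2 := by
  have e1 : PySem.Int.mod (c+1) 2 = (c+1) % 2 := PySem.Int.mod_eq_emod_of_pos (by norm_num)
  have e2 : PySem.Int.mod (c+2) 2 = (c+2) % 2 := PySem.Int.mod_eq_emod_of_pos (by norm_num)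
  have e0 : PySem.Int.mod c 2 = c % 2 := PySem.Int.mod_eq_emod_of_pos (by norm_num)
  have hev : estpremier (c+1) = false :=
    estpremier_even (c+1) (by rw [e1]; omega) (by omega)
  have hod : estpremier (c+2) = true := estpremier_odd (c+2) (by rw [e2]; omega)
  unfold premier_suivant psLoop
  rw [if_pos (by simp [hev]), show c + 1 + 1 = c + 2 by ring]
  unfold psLoop
  rw [if_neg (by simp [hod])]

theorem inner_eq_minFac : ∀ (fuel : Nat) (m : Nat) (c : Int), 2 ≤ m →
    (c = 2 ∨ (3 ≤ c ∧ PySem.Int.mod c 2 = 1)) → c ≤ (m.minFac : Int) →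
    (m.minFac : Int) - c < fuel →
    faInner (m : Int) c fuel = (m.minFac : Int) := by
  intro fuel
  induction fuel with
  | zero => intro m c h2 hc hle hf; omega
  | succ f ih =>
    intro m c h2 hc hle hf
    have hprime := Nat.minFac_prime (show m ≠ 1 by omega)
    have hdvd : m.minFac ∣ m := Nat.minFac_dvd m
    have hc2 : 2 ≤ c := by rcases hc with h | ⟨h, _⟩ <;> omega
    rw [faInner]
    by_cases hmod : PySem.Int.mod (m : Int) c = 0
    · rw [if_neg (fun h => h hmod)]
      have hdc : c ∣ (m : Int) := (PySem.Int.mod_eq_zero_iff_dvd _ _).mp hmod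
      have hcn : (c.toNat : Int) = c := Int.toNat_of_nonneg (by omega)
      have hdvdn : c.toNat ∣ m := by
        have : (c.toNat : Int) ∣ (m : Int) := by rw [hcn]; exact hdc
        exact_mod_cast this
      have hlef : m.minFac ≤ c.toNat := Nat.minFac_le_of_dvd (by omega) hdvdn
      omega
    · rw [if_pos hmod]
      have hlt : c < (m.minFac : Int) := by
        rcases eq_or_lt_of_le hle with heq | hlt
        · exact absurd (heq ▸ (PySem.Int.mod_eq_zero_iff_dvd _ _).mpr
            (Int.natCast_dvd_natCast.mpr hdvd)) hmod
        · exact hlt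
      rcases hc with rfl | ⟨h3, hodd⟩
      · rw [show premier_suivant 2 = 3 from by decide]
        refine ih m 3 h2 (Or.inr ⟨le_refl 3, by decide⟩) (by omega) (by omega)
      · rw [ps_odd c hodd h3]
        have hm2 : m.minFac % 2 = 1 := by
          rcases hprime.eq_two_or_odd with h | h
          · omega
          · exact h
        have hce : PySem.Int.mod c 2 = c % 2 := PySem.Int.mod_eq_emod_of_pos (by norm_num)
        have hc2e : PySem.Int.mod (c+2) 2 = (c+2) % 2 := PySem.Int.mod_eq_emod_of_pos (by norm_num)
        refine ih m (c+2) h2 (Or.inr ⟨by omega, by omega⟩) (by omega) (by omega)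

theorem faOuter_eq : ∀ (fuel : Nat) (m : Nat) (ch : List Char), m ≤ fuel → 1 ≤ m →
    faOuter (m : Int) ch fuel = ch ++ chFacs m := by
  intro fuel
  induction fuel with
  | zero => intro m ch hf h1; omega
  | succ f ih =>
    intro m ch hf h1
    rw [faOuter]
    by_cases h2 : 2 ≤ m
    · rw [if_pos (by omega : (1 : Int) < (m : Int))]
      have hprime := Nat.minFac_prime (show m ≠ 1 by omega)
      have hmfle : m.minFac ≤ m := Nat.minFac_le (by omega)
      have hinner : faInner (m : Int) 2 ((m : Int).toNat + 2) = (m.minFac : Int) := by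
        refine inner_eq_minFac _ m 2 h2 (Or.inl rfl) (by exact_mod_cast hprime.two_le) ?_
        simp only [Int.toNat_natCast]
        omega
      simp only [hinner]
      rw [PySem.Int.floordiv_natCast m m.minFac]
      have h1' : 1 ≤ m / m.minFac :=
        (Nat.one_le_div_iff hprime.pos).mpr hmfle
      have hlt : m / m.minFac < m := Nat.div_lt_self (by omega) hprime.two_le
      rw [ih (m / m.minFac) _ (by omega) h1']
      conv_rhs => rw [chFacs, dif_pos h2]
      rw [List.append_assoc]
    · rw [if_neg (by omega : ¬ ((1 : Int) < (m : Int)))]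
      have : m = 1 := by omega
      subst this
      rw [chFacs, dif_neg (by omega)]
      simp

theorem dsup_nonneg (l : List Char) : 0 ≤ dsup l :=
  (PySem.List.le_foldl_max_int l digitVal 0).1

theorem foldl_max_shift (l : List Char) (b : Int) (hb : 0 ≤ b) :
    l.foldl (fun mx c => max mx (digitVal c)) b = max b (dsup l) := by
  induction l generalizing b with
  | nil => simp only [List.foldl_nil, dsup]; omega
  | cons c l ih =>
    have hS := dsup_nonneg l
    simp only [List.foldl_cons]
    rw [ih _ (le_trans hb (le_max_left _ _))]
    have hd : dsup (c :: l) = max (max 0 (digitVal c)) (dsup l) := by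
      simp only [dsup, List.foldl_cons]
      exact ih _ (le_max_left 0 _)
    rw [hd]
    omega

theorem dsup_append (xs ys : List Char) : dsup (xs ++ ys) = max (dsup xs) (dsup ys) := by
  simp only [dsup, List.foldl_append]
  exact foldl_max_shift ys _ (dsup_nonneg xs)

theorem toDigitsCore_eq : ∀ (fuel n : Nat) (ds : List Char), n < fuel →
    Nat.toDigitsCore 10 fuel n ds = myDigs n ++ ds := by
  intro fuel
  induction fuel with
  | zero => intro n ds h; omega
  | succ f ih =>
    intro n ds h
    rw [Nat.toDigitsCore]
    by_cases h0 : n / 10 = 0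
    · rw [if_pos h0]
      conv_rhs => rw [myDigs, dif_pos h0]
      simp
    · rw [if_neg h0]
      have hn : 0 < n := by
        rcases Nat.eq_zero_or_pos n with rfl | h'
        · simp at h0
        · exact h'
      have hlt : n / 10 < n := Nat.div_lt_self hn (by norm_num)
      rw [ih (n / 10) _ (by omega)]
      conv_rhs => rw [myDigs, dif_neg h0]
      simp [List.append_assoc]

theorem toChars_natCast (p : Nat) : PySem.Int.toChars (p : Int) = myDigs p := by
  rw [PySem.Int.toChars, if_neg (by omega : ¬ ((p : Int) < 0)), Int.toNat_natCast,
    Nat.toDigits, toDigitsCore_eq (p+1) p [] (Nat.lt_succ_self p)]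
  simp

theorem digitChar_toNat (r : Nat) (h : r < 10) : (r.digitChar).toNat = 48 + r := by
  interval_cases r <;> decide

theorem myDigs_digits (n : Nat) : ∀ c ∈ myDigs n, 48 ≤ c.toNat ∧ c.toNat ≤ 57 := by
  induction n using Nat.strong_induction_on with
  | _ n ih =>
    have hr : n % 10 < 10 := Nat.mod_lt _ (by norm_num)
    have hd := digitChar_toNat (n % 10) hr
    rw [myDigs]
    split
    · intro c hc
      simp only [List.mem_singleton] at hc
      subst hc
      omega
    · intro c hc
      rcases List.mem_append.mp hc with hmem | hmem
      · exact ih (n / 10) (Nat.div_lt_self (by omega) (by norm_num)) c hmem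
      · simp only [List.mem_singleton] at hmem
        subst hmem
        omega

theorem digitVal_digitChar (r : Nat) (h : r < 10) : digitVal r.digitChar = (r : Int) := by
  unfold digitVal
  rw [digitChar_toNat r h]
  omega

theorem myDigs_ne_nil (n : Nat) : myDigs n ≠ [] := by
  rw [myDigs]; split <;> simp

theorem dsup_myDigs (n : Nat) : dsup (myDigs n) = MD n := by
  induction n using Nat.strong_induction_on with
  | _ n ih =>
    have hr : n % 10 < 10 := Nat.mod_lt _ (by norm_num)
    have hsing : dsup [(n % 10).digitChar] = ((n % 10 : Nat) : Int) := by
      simp only [dsup, List.foldl_cons, List.foldl_nil, digitVal_digitChar _ hr]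
      omega
    rw [myDigs]
    split
    · rename_i h0
      rw [hsing, MD]
      by_cases hn : n = 0
      · subst hn; simp
      · rw [if_neg hn, h0, MD]
        simp
        omega
    · rename_i h0
      have hn : n ≠ 0 := by
        intro h; subst h; simp at h0
      rw [dsup_append, hsing, ih (n / 10) (Nat.div_lt_self (by omega) (by norm_num))]
      conv_rhs => rw [MD]
      rw [if_neg hn]
      omega

theorem dsup_chFacs (m : Nat) : dsup (chFacs m) = G m := by
  induction m using Nat.strong_induction_on with
  | _ m ih =>
    rw [chFacs]
    split
    · rename_i h2
      have hprime := Nat.minFac_prime (show m ≠ 1 by omega)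
      rw [dsup_append, toChars_natCast, dsup_myDigs,
        ih (m / m.minFac) (Nat.div_lt_self (by omega) hprime.two_le)]
      conv_rhs => rw [G, dif_pos h2]
    · rename_i h2
      rw [G, dif_neg h2]
      simp [dsup]

theorem foldA_eq_max : ∀ (l : List Char) (b : Int),
    l.foldl (fun mx c' => if digitVal c' > mx then digitVal c' else mx) b
      = l.foldl (fun mx c' => max mx (digitVal c')) b := by
  intro l
  induction l with
  | nil => intro b; rfl
  | cons c l ih =>
    intro b
    simp only [List.foldl_cons]
    rw [show (if digitVal c > b then digitVal c else b) = max b (digitVal c) from by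
      rw [max_def]; split_ifs <;> omega]
    exact ih _

theorem facteurA_eq (M : Int) (h2 : 2 ≤ M) : Facteur M = G M.toNat := by
  obtain ⟨m, rfl⟩ : ∃ m : Nat, M = (m : Int) :=
    ⟨M.toNat, (Int.toNat_of_nonneg (by omega)).symm⟩
  have hm2 : 2 ≤ m := by omega
  simp only [Facteur, Int.toNat_natCast]
  rw [faOuter_eq m m [] (le_refl m) (by omega), List.nil_append]
  have hfacs : chFacs m = PySem.Int.toChars m.minFac ++ chFacs (m / m.minFac) := by
    rw [chFacs, dif_pos hm2]
  obtain ⟨c, cs', hmy⟩ : ∃ c cs', myDigs m.minFac = c :: cs' := by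
    rcases hd : myDigs m.minFac with _ | ⟨c, cs'⟩
    · exact absurd hd (myDigs_ne_nil _)
    · exact ⟨c, cs', rfl⟩
  obtain ⟨cs, hch⟩ : ∃ cs, chFacs m = c :: cs := by
    refine ⟨cs' ++ chFacs (m / m.minFac), ?_⟩
    rw [hfacs, toChars_natCast, hmy]
    simp
  have hcdig : 48 ≤ c.toNat ∧ c.toNat ≤ 57 :=
    myDigs_digits m.minFac c (by rw [hmy]; exact List.mem_cons_self ..)
  rw [hch]
  simp only []
  rw [foldA_eq_max]
  have hv : 0 ≤ digitVal c := by unfold digitVal; omega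
  calc (c :: cs).foldl (fun mx c' => max mx (digitVal c')) (digitVal c)
      = cs.foldl (fun mx c' => max mx (digitVal c')) (digitVal c) := by
        simp [List.foldl_cons]
    _ = dsup (c :: cs) := by
        simp only [dsup, List.foldl_cons]
        rw [show max 0 (digitVal c) = digitVal c from by omega]
    _ = G m := by rw [← hch, dsup_chFacs]

theorem bMD_eq : ∀ (fuel : Nat) (n : Nat) (m : Int), n ≤ fuel → 0 ≤ m →
    bMDLoop (n : Int) m fuel = max m (MD n) := by
  intro fuel
  induction fuel with
  | zero =>
    intro n m h hm
    have : n = 0 := by omega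
    subst this
    rw [bMDLoop, MD]
    simp
    omega
  | succ f ih =>
    intro n m h hm
    rw [bMDLoop]
    by_cases hn : 0 < n
    · rw [if_pos (by omega : ((n : Int)) > 0)]
      have hmod : PySem.Int.mod (n : Int) 10 = ((n % 10 : Nat) : Int) := by
        exact_mod_cast PySem.Int.mod_natCast n 10
      have hdiv : PySem.Int.floordiv (n : Int) 10 = ((n / 10 : Nat) : Int) := by
        exact_mod_cast PySem.Int.floordiv_natCast n 10
      rw [hmod, hdiv]
      rw [show (if ((n % 10 : Nat) : Int) > m then ((n % 10 : Nat) : Int) else m)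
            = max m ((n % 10 : Nat) : Int) from by rw [max_def]; split_ifs <;> omega]
      have hlt : n / 10 < n := Nat.div_lt_self hn (by norm_num)
      rw [ih (n / 10) _ (by omega) (le_trans hm (le_max_left _ _))]
      conv_rhs => rw [MD]
      rw [if_neg (by omega : ¬ n = 0)]
      omega
    · have : n = 0 := by omega
      subst this
      rw [if_neg (by simp), MD]
      simp
      omega

theorem bMaxdigit_natCast (p : Nat) : bMaxdigit (p : Int) = MD p := by
  rw [bMaxdigit, Int.toNat_natCast, bMD_eq p p 0 (le_refl p) (le_refl 0)]
  have := MD_nonneg p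
  omega

theorem strip_pos : ∀ (m p : Nat), 1 ≤ m → 1 ≤ strip m p := by
  intro m
  induction m using Nat.strong_induction_on with
  | _ m ih =>
    intro p h1
    rw [strip]
    split
    · rename_i hc
      refine ih (m / p) (Nat.div_lt_self (by omega) (by omega)) p ?_
      exact (Nat.one_le_div_iff (by omega)).mpr (Nat.le_of_dvd (by omega) hc.2.1)
    · exact h1

theorem strip_dvd : ∀ (m p : Nat), strip m p ∣ m := by
  intro m
  induction m using Nat.strong_induction_on with
  | _ m ih =>
    intro p
    rw [strip]
    split
    · rename_i hc
      exact (ih (m / p) (Nat.div_lt_self (by omega) (by omega)) p).trans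
        (Nat.div_dvd_of_dvd hc.2.1)
    · exact dvd_refl m

theorem strip_not_dvd : ∀ (m p : Nat), 2 ≤ p → 1 ≤ m → ¬ p ∣ strip m p := by
  intro m
  induction m using Nat.strong_induction_on with
  | _ m ih =>
    intro p h2 h1
    rw [strip]
    split
    · rename_i hc
      refine ih (m / p) (Nat.div_lt_self (by omega) (by omega)) p h2 ?_
      exact (Nat.one_le_div_iff (by omega)).mpr (Nat.le_of_dvd (by omega) hc.2.1)
    · rename_i hc
      intro hd
      exact hc ⟨h2, hd, h1⟩

theorem bInner_eq : ∀ (fuel : Nat) (m p : Nat) (best : Int), 1 ≤ m → 2 ≤ p → m ≤ fuel →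
    bInner (p : Int) (m : Int) best fuel =
      ((strip m p : Int), if p ∣ m then max best (MD p) else best) := by
  intro fuel
  induction fuel with
  | zero => intro m p best h1 hp hf; omega
  | succ f ih =>
    intro m p best h1 hp hf
    have hmodc : PySem.Int.mod (m : Int) (p : Int) = 0 ↔ p ∣ m := by
      rw [PySem.Int.mod_eq_zero_iff_dvd]
      exact Int.natCast_dvd_natCast
    by_cases hd : p ∣ m
    · simp only [bInner]
      rw [if_pos (hmodc.mpr hd), bMaxdigit_natCast]
      have hdiv : PySem.Int.floordiv (m : Int) (p : Int) = ((m / p : Nat) : Int) := by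
        exact_mod_cast PySem.Int.floordiv_natCast m p
      rw [hdiv]
      have hple := Nat.le_of_dvd (by omega) hd
      have h1' : 1 ≤ m / p := (Nat.one_le_div_iff (by omega)).mpr hple
      have hlt : m / p < m := Nat.div_lt_self (by omega) (by omega)
      rw [ih (m / p) p _ h1' hp (by omega)]
      rw [show (if MD p > best then MD p else best) = max best (MD p) from by
        rw [max_def]; split_ifs <;> omega]
      have hs : strip m p = strip (m / p) p := by
        conv_lhs => rw [strip, dif_pos ⟨hp, hd, h1⟩]
      rw [if_pos hd, ← hs]
      have hMD := MD_nonneg p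
      congr 1
      split_ifs <;> omega
    · simp only [bInner]
      rw [if_neg (fun h => hd (hmodc.mp h)), if_neg hd]
      have hs : strip m p = m := by rw [strip, dif_neg (by tauto)]
      rw [hs]

theorem G_strip : ∀ (m p : Nat), 1 ≤ m → p.Prime → p ∣ m →
    (∀ q : Nat, q.Prime → q ∣ m → p ≤ q) →
    G m = max (MD p) (G (strip m p)) := by
  intro m
  induction m using Nat.strong_induction_on with
  | _ m ih =>
    intro p h1 hp hd hmin
    have hp2 := hp.two_le
    have hple := Nat.le_of_dvd (by omega) hd
    have hm2 : 2 ≤ m := by omega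
    have hminfac : m.minFac = p := by
      have ha : m.minFac ≤ p := Nat.minFac_le_of_dvd hp2 hd
      have hb : p ≤ m.minFac := hmin _ (Nat.minFac_prime (by omega)) (Nat.minFac_dvd m)
      omega
    have hGm : G m = max (MD p) (G (m / p)) := by rw [G, dif_pos hm2, hminfac]
    have hs : strip m p = strip (m / p) p := by
      conv_lhs => rw [strip, dif_pos ⟨hp2, hd, h1⟩]
    have hlt : m / p < m := Nat.div_lt_self (by omega) (by omega)
    have h1' : 1 ≤ m / p := (Nat.one_le_div_iff (by omega)).mpr hple
    by_cases hd' : p ∣ m / p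
    · have hmin' : ∀ q : Nat, q.Prime → q ∣ m / p → p ≤ q :=
        fun q hq hqd => hmin q hq (hqd.trans (Nat.div_dvd_of_dvd hd))
      have hrec := ih (m / p) hlt p h1' hp hd' hmin'
      rw [hGm, hrec, hs]
      omega
    · have hs2 : strip (m / p) p = m / p := by rw [strip, dif_neg (by tauto)]
      rw [hGm, hs, hs2]

theorem G_one : G 1 = 0 := by rw [G]; norm_num

theorem bOuter_eq : ∀ (fuel : Nat) (m c : Nat) (best : Int), 1 ≤ m → 2 ≤ c →
    (c = 2 ∨ c % 2 = 1) → (∀ q : Nat, q.Prime → q ∣ m → c ≤ q) → 0 ≤ best →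
    m + 1 ≤ fuel + c →
    (let r := bOuter (m : Int) (c : Int) best fuel;
     if r.1 > 1 then (if bMaxdigit r.1 > r.2 then bMaxdigit r.1 else r.2) else r.2)
      = max best (G m) := by
  intro fuel
  induction fuel with
  | zero =>
    intro m c best h1 hc2 hpar hmin hb hf
    have hm1 : m = 1 := by
      by_contra h
      have hq := Nat.minFac_prime (show m ≠ 1 by omega)
      have h3 := hmin _ hq (Nat.minFac_dvd m)
      have h4 := Nat.minFac_le (show 0 < m by omega)
      omega
    subst hm1
    simp only [bOuter]
    rw [if_neg (by norm_num : ¬ (((1 : Nat) : Int) > 1)), G_one]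
    omega
  | succ f ih =>
    intro m c best h1 hc2 hpar hmin hb hf
    simp only [bOuter, Int.toNat_natCast]
    by_cases hcc : c * c ≤ m
    · rw [if_pos (by exact_mod_cast hcc : ((c : Int)) * (c : Int) ≤ (m : Int))]
      rw [bInner_eq m m c best h1 hc2 (le_refl m)]
      -- the next candidate, as a natural number
      have hcast2 : ((c : Int) = 2) ↔ c = 2 := by exact_mod_cast Iff.rfl
      have hnext : (if (c : Int) = 2 then (c : Int) + 1 else (c : Int) + 2)
          = ((if c = 2 then c + 1 else c + 2 : Nat) : Int) := by
        by_cases h : c = 2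
        · rw [if_pos (hcast2.mpr h), if_pos h]; push_cast; ring
        · rw [if_neg (fun hh => h (hcast2.mp hh)), if_neg h]; push_cast; ring
      rw [hnext]
      set c' : Nat := if c = 2 then c + 1 else c + 2 with hc'
      have hc'ge : c + 1 ≤ c' := by rw [hc']; split_ifs <;> omega
      have hc'2 : 2 ≤ c' := by omega
      have hc'par : c' = 2 ∨ c' % 2 = 1 := by
        rcases hpar with h | h
        · right; rw [hc', if_pos h]; omega
        · right; rw [hc', if_neg (by omega)]; omega
      by_cases hd : c ∣ m
      · rw [if_pos hd]
        -- c is the least prime factor of m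
        have hm2 : 2 ≤ m := by
          have := Nat.le_of_dvd (by omega) hd
          omega
        have hcp : c.Prime := by
          have ha : m.minFac ≤ c := Nat.minFac_le_of_dvd hc2 hd
          have hbb : c ≤ m.minFac := hmin _ (Nat.minFac_prime (by omega)) (Nat.minFac_dvd m)
          have : m.minFac = c := by omega
          exact this ▸ Nat.minFac_prime (by omega)
        have hs1 : 1 ≤ strip m c := strip_pos m c h1
        have hsd : strip m c ∣ m := strip_dvd m c
        have hsle : strip m c ≤ m := Nat.le_of_dvd (by omega) hsd
        have hmin' : ∀ q : Nat, q.Prime → q ∣ strip m c → c' ≤ q := by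
          intro q hq hqd
          have hqm : c ≤ q := hmin q hq (hqd.trans hsd)
          have hqne : q ≠ c := by
            intro h; exact strip_not_dvd m c hc2 h1 (h ▸ hqd)
          rcases hpar with h | h
          · -- c = 2, c' = 3; q prime > 2 so q ≥ 3
            rw [hc', if_pos h]; omega
          · -- c odd, q prime > c ≥ 3 so q odd, hence q ≥ c + 2
            have hq2 : q ≠ 2 := by omega
            have hqodd : q % 2 = 1 := by
              rcases hq.eq_two_or_odd with hh | hh
              · omega
              · exact hh
            rw [hc', if_neg (by omega)]; omega
        have hb' : 0 ≤ max best (MD c) := le_trans hb (le_max_left _ _)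
        have hrec := ih (strip m c) c' (max best (MD c)) hs1 hc'2 hc'par hmin' hb' (by omega)
        simp only at hrec ⊢
        rw [hrec]
        have hGsplit := G_strip m c h1 hcp hd hmin
        rw [hGsplit]
        omega
      · rw [if_neg hd]
        have hsm : strip m c = m := by rw [strip, dif_neg (by tauto)]
        rw [hsm]
        have hmin' : ∀ q : Nat, q.Prime → q ∣ m → c' ≤ q := by
          intro q hq hqd
          have hqm : c ≤ q := hmin q hq hqd
          have hqne : q ≠ c := by
            intro h; exact hd (h ▸ hqd)
          rcases hpar with h | h
          · rw [hc', if_pos h]; omega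
          · have hq2 : q ≠ 2 := by omega
            have hqodd : q % 2 = 1 := by
              rcases hq.eq_two_or_odd with hh | hh
              · omega
              · exact hh
            rw [hc', if_neg (by omega)]; omega
        exact ih m c' best h1 hc'2 hc'par hmin' hb (by omega)
    · rw [if_neg (by exact_mod_cast hcc : ¬ (((c : Int)) * (c : Int) ≤ (m : Int)))]
      by_cases hm : 2 ≤ m
      · have hmp : m.Prime := by
          by_contra h
          have hsq := Nat.minFac_sq_le_self (show 0 < m by omega) h
          have hge := hmin _ (Nat.minFac_prime (by omega)) (Nat.minFac_dvd m)
          have : c * c ≤ m.minFac * m.minFac := Nat.mul_le_mul hge hge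
          rw [pow_two] at hsq
          omega
        simp only
        rw [if_pos (by omega : ((m : Int)) > 1), bMaxdigit_natCast]
        have hGm : G m = MD m := by
          rw [G, dif_pos hm, hmp.minFac_eq, Nat.div_self (by omega), G_one]
          have := MD_nonneg m
          omega
        rw [hGm]
        split_ifs <;> omega
      · have : m = 1 := by omega
        subst this
        simp only
        rw [if_neg (by norm_num : ¬ (((1 : Nat) : Int) > 1)), G_one]
        omega

theorem facteurB_eq (M : Int) (h2 : 2 ≤ M) : Facteur_alt M = G M.toNat := by
  obtain ⟨m, rfl⟩ : ∃ m : Nat, M = (m : Int) :=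
    ⟨M.toNat, (Int.toNat_of_nonneg (by omega)).symm⟩
  have hm2 : 2 ≤ m := by omega
  have h := bOuter_eq m m 2 0 (by omega) (le_refl 2) (Or.inl rfl)
    (fun q hq _ => hq.two_le) (le_refl 0) (by omega)
  have hmax : max (0 : Int) (G m) = G m := by
    have := G_nonneg m
    omega
  simp only [Facteur_alt, Int.toNat_natCast]
  simp only at h
  rw [show ((2 : Nat) : Int) = (2 : Int) from by norm_num] at h
  rw [← hmax]
  exact h

-- ===== VERDICT (by name: the statement is the Claim_ definition above) =====
theorem Facteur_spec : Claim_equal_Facteur := by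
  intro M _ hpre
  unfold Spec_Facteur
  rw [facteurA_eq M hpre, facteurB_eq M hpre]
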